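-- pv_equiv track=rewrite | github.com/thorsheim/email-security-world-requirements | scripts/generate_webversion.py | best_req_per_standard
-- ===== SOURCE A (Python) =====
-- STATUS_PRIORITY = {
--     "mandatory": 4,
--     "recommended": 3,
--     "informational": 2,
--     "none": 1,
--     "unknown": 0,
-- }
--
-- def best_req_per_standard(requirements):
--     """For each standard return the entry with the highest status."""
--     groups = {}
--     for req in requirements:
--         std = req.get("standard")
--         if not std:
--             continue
--         if std not in groups:
--             groups[std] = req
--         else:
--             if STATUS_PRIORITY.get(req.get("status", "unknown"), 0) > STATUS_PRIORITY.get(groups[std].get("status", "unknown"), 0):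
--                 groups[std] = req
--     return groups
-- ===== SOURCE B (Python) =====
-- STATUS_PRIORITY = {
--     "mandatory": 4,
--     "recommended": 3,
--     "informational": 2,
--     "none": 1,
--     "unknown": 0,
-- }
--
-- def _prio(req):
--     return STATUS_PRIORITY.get(req.get("status", "unknown"), 0)
--
-- def best_req_per_standard(requirements):
--     """For each standard return the entry with the highest status."""
--     kept = [(r.get("standard"), r) for r in requirements if r.get("standard")]
--     out = {}
--     for std, _ in kept:
--         if std in out:
--             continue
--         best = None
--         for s, r in kept:
--             if s == std and (best is None or _prio(r) > _prio(best)):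
--                 best = r
--         if best is not None:
--             out[std] = best
--     return out
-- ===== Notes on version B (the rewrite author's own statement) =====
-- stated objective: alternative
-- what changed: A maintains a running best-requirement dict in one online fold; B instead materialises the kept (standard, requirement) pairs once and then, for each first occurrence of a standard, rescans that list to pick the first requirement of maximal priority, so no running-best state is kept.
import Mathlib
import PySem

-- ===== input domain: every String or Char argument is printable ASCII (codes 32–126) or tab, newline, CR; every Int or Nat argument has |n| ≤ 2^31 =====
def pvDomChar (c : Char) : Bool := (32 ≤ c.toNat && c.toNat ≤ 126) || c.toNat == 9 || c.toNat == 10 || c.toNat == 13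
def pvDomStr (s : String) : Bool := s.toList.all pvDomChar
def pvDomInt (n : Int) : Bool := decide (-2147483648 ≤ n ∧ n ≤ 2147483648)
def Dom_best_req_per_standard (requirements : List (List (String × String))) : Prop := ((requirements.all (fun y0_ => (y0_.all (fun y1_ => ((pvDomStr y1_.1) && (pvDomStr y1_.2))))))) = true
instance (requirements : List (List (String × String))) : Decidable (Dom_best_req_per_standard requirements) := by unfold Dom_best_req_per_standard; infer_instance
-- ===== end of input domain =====

-- B replaces A's online keep-the-best fold (one dict of running bests) by a stateless two-stage
-- scheme: extract the kept (standard, requirement) pairs once, then for the first occurrence of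
-- each standard rescan that list for its first maximal-priority requirement; objective:
-- alternative, same observable result.

-- ===== PORT A =====
-- STATUS_PRIORITY (module constant)
def pvStatusPriority : PySem.Dict String Int :=
  PySem.Dict.ofList [("mandatory", 4), ("recommended", 3), ("informational", 2), ("none", 1), ("unknown", 0)]

-- STATUS_PRIORITY.get(req.get("status", "unknown"), 0)
def pvPrio (req : PySem.Dict String String) : Int :=
  pvStatusPriority.getD (req.getD "status" "unknown") 0

def best_req_per_standard (requirements : List (List (String × String))) : List (String × List (String × String)) :=
  let groups : PySem.Dict String (PySem.Dict String String) :=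
    requirements.foldl (fun groups req0 =>
      let req := PySem.Dict.ofList req0
      match req.get? "standard" with
      | none => groups                              -- std is None: falsy, continue
      | some std =>
        if std = "" then groups                     -- empty string: falsy, continue
        else if groups.contains std = false then groups.insert std req
        else if pvPrio req > pvPrio (groups.getD std PySem.Dict.empty) then groups.insert std req
        else groups) PySem.Dict.empty
  groups.items.map (fun p => (p.1, p.2.items))

-- ===== PORT B =====
def best_req_per_standard_alt (requirements : List (List (String × String))) : List (String × List (String × String)) :=
  -- kept = [(r.get("standard"), r) for r in requirements if r.get("standard")]
  let kept : List (String × PySem.Dict String String) :=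
    requirements.filterMap (fun r0 =>
      let r := PySem.Dict.ofList r0
      match r.get? "standard" with
      | none => none
      | some std => if std = "" then none else some (std, r))
  -- for std, _ in kept: first occurrence wins; rescan kept for the first maximal-priority entry
  let out : PySem.Dict String (PySem.Dict String String) :=
    kept.foldl (fun out p =>
      if out.contains p.1 then out
      else
        match kept.foldl (fun best q =>
          match best with
          | none => if q.1 = p.1 then some q.2 else none
          | some b => if q.1 = p.1 ∧ pvPrio q.2 > pvPrio b then some q.2 else some b) none with
        | none => out
        | some b => out.insert p.1 b) PySem.Dict.empty
  out.items.map (fun p => (p.1, p.2.items))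

-- ===== PRECONDITION & SPEC =====
def Spec_best_req_per_standard (requirements : List (List (String × String))) (out : List (String × List (String × String))) : Prop := out = best_req_per_standard_alt requirements
instance (requirements : List (List (String × String))) (out : List (String × List (String × String))) : Decidable (Spec_best_req_per_standard requirements out) := by unfold Spec_best_req_per_standard; infer_instance

-- ===== CLAIM (what is proved, stated in full; the proofs are below) =====
def Claim_equal_best_req_per_standard : Prop := ∀ (requirements : List (List (String × String))), Dom_best_req_per_standard requirements → Spec_best_req_per_standard requirements (best_req_per_standard requirements)

-- ===== LEMMAS AND PROOFS =====

-- the standard under which a requirement is filed (none = skipped)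
def pvKey (req0 : List (String × String)) : Option String :=
  match (PySem.Dict.ofList req0).get? "standard" with
  | none => none
  | some s => if s = "" then none else some s

-- the kept (standard, requirement-dict) pairs, in order
def pvL (requirements : List (List (String × String))) : List (String × PySem.Dict String String) :=
  requirements.filterMap (fun r => (pvKey r).map (fun s => (s, PySem.Dict.ofList r)))

-- one step of A's loop, on a kept pair
def pvStepA (d : PySem.Dict String (PySem.Dict String String)) (p : String × PySem.Dict String String) :
    PySem.Dict String (PySem.Dict String String) :=
  if d.contains p.1 = false then d.insert p.1 p.2
  else if pvPrio p.2 > pvPrio (d.getD p.1 PySem.Dict.empty) then d.insert p.1 p.2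
  else d

-- the Option-valued running "first maximum" step (= PySem.List.max?'s fold step)
def pvMStep (acc : Option (PySem.Dict String String)) (x : PySem.Dict String String) :
    Option (PySem.Dict String String) :=
  match acc with
  | none => some x
  | some m => if pvPrio m < pvPrio x then some x else some m

-- B's inner rescan step for standard k
def pvScanStep (k : String) (best : Option (PySem.Dict String String))
    (q : String × PySem.Dict String String) : Option (PySem.Dict String String) :=
  match best with
  | none => if q.1 = k then some q.2 else none
  | some b => if q.1 = k ∧ pvPrio q.2 > pvPrio b then some q.2 else some b

-- B's outer step: keep first occurrence, value = first maximum of the whole kept list at that key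
def pvStepB (K : List (String × PySem.Dict String String))
    (out : PySem.Dict String (PySem.Dict String String)) (p : String × PySem.Dict String String) :
    PySem.Dict String (PySem.Dict String String) :=
  if out.contains p.1 then out
  else
    match K.foldl (pvScanStep p.1) none with
    | none => out
    | some b => out.insert p.1 b

-- first maximal-priority requirement of k's group
def pvMval (K : List (String × PySem.Dict String String)) (k : String) :
    Option (PySem.Dict String String) :=
  PySem.List.max? ((K.filter (fun p => p.1 == k)).map (·.2)) pvPrio

lemma foldA_eq (reqs : List (List (String × String))) :
    ∀ d : PySem.Dict String (PySem.Dict String String),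
      reqs.foldl (fun groups req0 =>
        let req := PySem.Dict.ofList req0
        match req.get? "standard" with
        | none => groups
        | some std =>
          if std = "" then groups
          else if groups.contains std = false then groups.insert std req
          else if pvPrio req > pvPrio (groups.getD std PySem.Dict.empty) then groups.insert std req
          else groups) d
      = (pvL reqs).foldl pvStepA d := by
  induction reqs with
  | nil => intro d; simp [pvL]
  | cons r t ih =>
    intro d
    simp only [List.foldl_cons, pvL, List.filterMap_cons]
    cases hg : (PySem.Dict.ofList r).get? "standard" with
    | none => simpa [pvKey, hg, pvL] using ih _
    | some s =>
      by_cases hs : s = ""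
      · simpa [pvKey, hg, hs, pvL] using ih _
      · simpa [pvKey, hg, hs, pvL, pvStepA] using ih _

lemma kept_eq (reqs : List (List (String × String))) :
    reqs.filterMap (fun r0 =>
      let r := PySem.Dict.ofList r0
      match r.get? "standard" with
      | none => none
      | some std => if std = "" then none else some (std, r))
    = pvL reqs := by
  unfold pvL
  apply List.filterMap_congr
  intro r0 _
  cases hg : (PySem.Dict.ofList r0).get? "standard" with
  | none => simp [pvKey, hg]
  | some s => by_cases hs : s = "" <;> simp [pvKey, hg, hs]

lemma stepA_keys (d : PySem.Dict String (PySem.Dict String String)) (p : String × PySem.Dict String String) :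
    (pvStepA d p).keys = PySem.Set.add d.keys p.1 := by
  cases hc : d.contains p.1 with
  | false =>
    have hm : p.1 ∉ d.keys := by
      intro hmem; rw [← PySem.Dict.contains_iff_mem_keys] at hmem; simp [hc] at hmem
    unfold pvStepA PySem.Set.add
    simp [hc, PySem.Dict.keys_insert_of_not_contains d p.2 hc, PySem.Set.contains, hm]
  | true =>
    have hm : p.1 ∈ d.keys := (PySem.Dict.contains_iff_mem_keys d p.1).mp hc
    have hsc : PySem.Set.contains d.keys p.1 = true := by simp [PySem.Set.contains, hm]
    unfold pvStepA PySem.Set.add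
    rw [if_neg (by simp [hc]), if_pos hsc]
    split_ifs with h
    · exact PySem.Dict.keys_insert_of_contains d p.2 hc
    · rfl

lemma stepA_nodup (d : PySem.Dict String (PySem.Dict String String)) (p : String × PySem.Dict String String)
    (h : d.keys.Nodup) : (pvStepA d p).keys.Nodup := by
  rw [stepA_keys]
  unfold PySem.Set.add
  split_ifs with hc
  · exact h
  · refine List.Nodup.append h (List.nodup_singleton _) ?_
    intro a ha hb
    simp at hb
    subst hb
    simp [PySem.Set.contains] at hc
    exact hc ha

lemma foldA_keys (L : List (String × PySem.Dict String String)) :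
    ∀ d : PySem.Dict String (PySem.Dict String String),
      (L.foldl pvStepA d).keys = PySem.Set.update d.keys (L.map (·.1)) := by
  induction L with
  | nil => intro d; simp [PySem.Set.update]
  | cons p t ih =>
    intro d
    simp only [List.foldl_cons, List.map_cons, PySem.Set.update] at *
    rw [ih, ← stepA_keys]

lemma foldA_get? (L : List (String × PySem.Dict String String)) (k : String) :
    ∀ d : PySem.Dict String (PySem.Dict String String), d.keys.Nodup →
      (L.foldl pvStepA d).get? k
        = ((L.filter (fun p => p.1 == k)).map (·.2)).foldl pvMStep (d.get? k) := by
  induction L with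
  | nil => intro d _; simp
  | cons p t ih =>
    intro d hnd
    simp only [List.foldl_cons, List.filter_cons]
    by_cases hk : p.1 = k
    · have hstep : (pvStepA d p).get? k = pvMStep (d.get? k) p.2 := by
        subst hk
        unfold pvStepA pvMStep
        cases hg : d.get? p.1 with
        | none =>
          have hc : d.contains p.1 = false := by
            rw [PySem.Dict.contains_eq_isSome_get?, hg]; rfl
          simp [hc, PySem.Dict.get?_insert_self]
        | some cur =>
          have hc : d.contains p.1 = true := by
            rw [PySem.Dict.contains_eq_isSome_get?, hg]; rfl
          have hgd : d.getD p.1 PySem.Dict.empty = cur := by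
            rw [PySem.Dict.getD_eq_get?_getD, hg]; rfl
          rw [if_neg (by simp [hc]), hgd]
          simp only [gt_iff_lt]
          split_ifs with h
          · simp [PySem.Dict.get?_insert_self]
          · exact hg
      simp only [hk, beq_self_eq_true, if_true, List.map_cons, List.foldl_cons, ← hstep]
      exact ih _ (stepA_nodup d p hnd)
    · have hstep : (pvStepA d p).get? k = d.get? k := by
        unfold pvStepA
        have hne : k ≠ p.1 := fun h => hk h.symm
        split_ifs <;> simp [PySem.Dict.get?_insert_of_ne _ _ hne]
      have hbeq : (p.1 == k) = false := by simp [hk]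
      simp only [hbeq, Bool.false_eq_true, if_false, ← hstep]
      exact ih _ (stepA_nodup d p hnd)

lemma max?_eq_foldl_mstep (ms : List (PySem.Dict String String)) :
    PySem.List.max? ms pvPrio = ms.foldl pvMStep none := by
  unfold PySem.List.max?
  apply PySem.List.foldl_congr_mem
  intro acc x _
  cases acc <;> rfl

-- B's inner rescan equals the running-first-maximum fold over k's group
lemma scan_eq (k : String) (K : List (String × PySem.Dict String String)) :
    ∀ acc, K.foldl (pvScanStep k) acc
      = ((K.filter (fun p => p.1 == k)).map (·.2)).foldl pvMStep acc := by
  induction K with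
  | nil => intro acc; simp
  | cons q t ih =>
    intro acc
    simp only [List.foldl_cons, List.filter_cons]
    by_cases hq : q.1 = k
    · have hstep : pvScanStep k acc q = pvMStep acc q.2 := by
        unfold pvScanStep pvMStep
        cases acc with
        | none => simp [hq]
        | some b => simp only [hq, gt_iff_lt, true_and]
      simp only [hq, beq_self_eq_true, if_true, List.map_cons, List.foldl_cons, hstep, ih]
    · have hstep : pvScanStep k acc q = acc := by
        unfold pvScanStep
        cases acc with
        | none => simp [hq]
        | some b => simp [hq]
      have hbeq : (q.1 == k) = false := by simp [hq]
      simp only [hbeq, Bool.false_eq_true, if_false, hstep, ih]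

lemma scan_mval (k : String) (K : List (String × PySem.Dict String String)) :
    K.foldl (pvScanStep k) none = pvMval K k := by
  rw [scan_eq, pvMval, max?_eq_foldl_mstep]

lemma mval_isSome {K : List (String × PySem.Dict String String)}
    {p : String × PySem.Dict String String} (hp : p ∈ K) : (pvMval K p.1).isSome := by
  unfold pvMval
  cases hm : PySem.List.max? ((K.filter (fun q => q.1 == p.1)).map (·.2)) pvPrio with
  | none =>
    rw [PySem.List.max?_eq_none_iff] at hm
    have : p ∈ K.filter (fun q => q.1 == p.1) := by
      rw [List.mem_filter]; exact ⟨hp, by simp⟩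
    simp [List.map_eq_nil_iff.mp hm] at this
  | some b => rfl

lemma foldB_keys (K : List (String × PySem.Dict String String)) :
    ∀ L' : List (String × PySem.Dict String String), (∀ p ∈ L', (pvMval K p.1).isSome) →
      ∀ d : PySem.Dict String (PySem.Dict String String),
        (L'.foldl (pvStepB K) d).keys = PySem.Set.update d.keys (L'.map (·.1)) := by
  intro L'
  induction L' with
  | nil => intro _ d; simp [PySem.Set.update]
  | cons p t ih =>
    intro h d
    simp only [List.foldl_cons, List.map_cons, PySem.Set.update]
    have hstep : (pvStepB K d p).keys = PySem.Set.add d.keys p.1 := by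
      unfold pvStepB
      cases hc : d.contains p.1 with
      | true =>
        have hm : p.1 ∈ d.keys := (PySem.Dict.contains_iff_mem_keys d p.1).mp hc
        unfold PySem.Set.add
        simp [PySem.Set.contains, hm]
      | false =>
        have hm : p.1 ∉ d.keys := by
          intro hmem; rw [← PySem.Dict.contains_iff_mem_keys] at hmem; simp [hc] at hmem
        obtain ⟨b, hb⟩ := Option.isSome_iff_exists.mp (h p (List.mem_cons_self ..))
        rw [scan_mval] at *
        unfold PySem.Set.add
        simp [hb, PySem.Dict.keys_insert_of_not_contains d b hc, PySem.Set.contains, hm]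
    have := ih (fun q hq => h q (List.mem_cons_of_mem _ hq)) (pvStepB K d p)
    rw [this, hstep]
    rfl
  -- note: PySem.Set.update d.keys (p.1 :: t.map fst) unfolds to update (add d.keys p.1) (t.map fst)

lemma foldB_get? (K : List (String × PySem.Dict String String)) (k : String) :
    ∀ L' : List (String × PySem.Dict String String),
      ∀ d : PySem.Dict String (PySem.Dict String String),
        (L'.foldl (pvStepB K) d).get? k
          = (d.get? k).or (if k ∈ L'.map (·.1) then pvMval K k else none) := by
  intro L'
  induction L' with
  | nil => intro d; simp
  | cons p t ih =>
    intro d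
    simp only [List.foldl_cons, List.map_cons, List.mem_cons]
    rw [ih]
    by_cases hk : p.1 = k
    · subst hk
      cases hg : d.get? p.1 with
      | some v =>
        have hc : d.contains p.1 = true := by
          rw [PySem.Dict.contains_eq_isSome_get?, hg]; rfl
        have : pvStepB K d p = d := by unfold pvStepB; simp [hc]
        simp [this, hg]
      | none =>
        have hc : d.contains p.1 = false := by
          rw [PySem.Dict.contains_eq_isSome_get?, hg]; rfl
        cases hm : pvMval K p.1 with
        | none =>
          have : pvStepB K d p = d := by
            unfold pvStepB; rw [scan_mval, hm]; simp [hc]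
          simp [this, hg]
        | some b =>
          have : pvStepB K d p = d.insert p.1 b := by
            unfold pvStepB; rw [scan_mval, hm]; simp [hc]
          simp [this, PySem.Dict.get?_insert_self]
    · have hne : k ≠ p.1 := fun h => hk h.symm
      have : (pvStepB K d p).get? k = d.get? k := by
        unfold pvStepB
        split
        · rfl
        · split
          · rfl
          · exact PySem.Dict.get?_insert_of_ne _ _ hne
      rw [this]
      have hiff : (k = p.1 ∨ k ∈ t.map (·.1)) ↔ (k ∈ t.map (·.1)) :=
        ⟨fun h => h.elim (fun h => absurd h hne) id, Or.inr⟩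
      simp only [hiff]

-- ===== VERDICT (by name: the statement is the Claim_ definition above) =====
theorem best_req_per_standard_spec : Claim_equal_best_req_per_standard := by
  unfold Claim_equal_best_req_per_standard Spec_best_req_per_standard
  intro reqs _
  unfold best_req_per_standard best_req_per_standard_alt
  dsimp only
  rw [foldA_eq, kept_eq]
  have hB : ∀ d, (pvL reqs).foldl (fun out p =>
      if out.contains p.1 then out
      else
        match (pvL reqs).foldl (fun best q =>
          match best with
          | none => if q.1 = p.1 then some q.2 else none
          | some b => if q.1 = p.1 ∧ pvPrio q.2 > pvPrio b then some q.2 else some b) none with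
        | none => out
        | some b => out.insert p.1 b) d
      = (pvL reqs).foldl (pvStepB (pvL reqs)) d := by
    intro d; rfl
  rw [hB]
  set L := pvL reqs with hL
  set dA := L.foldl pvStepA PySem.Dict.empty with hdA
  set dB := L.foldl (pvStepB L) PySem.Dict.empty with hdB
  have hkA : dA.keys = PySem.Set.ofList (L.map (·.1)) := by
    rw [hdA, foldA_keys]; rfl
  have hkB : dB.keys = PySem.Set.ofList (L.map (·.1)) := by
    rw [hdB, foldB_keys L L (fun p hp => mval_isSome hp)]; rfl
  have hndA : dA.keys.Nodup := by rw [hkA]; exact PySem.Set.nodup_ofList _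
  have hndB : dB.keys.Nodup := by rw [hkB]; exact PySem.Set.nodup_ofList _
  rw [PySem.Dict.items_eq_map_keys dA hndA PySem.Dict.empty,
      PySem.Dict.items_eq_map_keys dB hndB PySem.Dict.empty, hkA, hkB]
  simp only [List.map_map]
  apply List.map_congr_left
  intro k hkmem
  have hkmem' : k ∈ L.map (·.1) := (PySem.Set.mem_ofList _ _).mp hkmem
  have hgA : dA.get? k = pvMval L k := by
    rw [hdA, foldA_get? L k PySem.Dict.empty (by simp [PySem.Dict.keys_empty]),
        pvMval, max?_eq_foldl_mstep]
    rfl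
  have hgB : dB.get? k = pvMval L k := by
    rw [hdB, foldB_get? L k L PySem.Dict.empty]
    simp [hkmem']
  simp only [Function.comp]
  rw [PySem.Dict.getD_eq_get?_getD, PySem.Dict.getD_eq_get?_getD, hgA, hgB]
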